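-- pv_equiv track=rewrite | github.com/joserenter1a/leetcode | palindromic.py | groupPalindrome
-- ===== SOURCE A (Python) =====
-- from typing import List
--
-- def groupPalindrome(strs: List[str]) -> List[List[str]]:
--     pals = []
--     def is_pal(el):
--         return el == el[::-1]
--
--     for el in strs:
--         if is_pal(el):
--             pals.append(el)
--     return pals
-- ===== SOURCE B (Python) =====
-- from typing import List
--
-- def groupPalindrome(strs: List[str]) -> List[List[str]]:
--     def is_pal(el):
--         i, j = 0, len(el) - 1
--         while i < j:
--             if el[i] != el[j]:
--                 return False
--             i += 1
--             j -= 1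
--         return True
--     return [el for el in strs if is_pal(el)]
-- ===== Notes on version B (the rewrite author's own statement) =====
-- stated objective: alternative
-- what changed: Replaces the reversal-and-compare palindrome test (which allocates a reversed copy of every string) by a two-pointer scan from both ends with early termination on the first mismatch, and builds the result with a comprehension instead of an accumulator loop.
import Mathlib
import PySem

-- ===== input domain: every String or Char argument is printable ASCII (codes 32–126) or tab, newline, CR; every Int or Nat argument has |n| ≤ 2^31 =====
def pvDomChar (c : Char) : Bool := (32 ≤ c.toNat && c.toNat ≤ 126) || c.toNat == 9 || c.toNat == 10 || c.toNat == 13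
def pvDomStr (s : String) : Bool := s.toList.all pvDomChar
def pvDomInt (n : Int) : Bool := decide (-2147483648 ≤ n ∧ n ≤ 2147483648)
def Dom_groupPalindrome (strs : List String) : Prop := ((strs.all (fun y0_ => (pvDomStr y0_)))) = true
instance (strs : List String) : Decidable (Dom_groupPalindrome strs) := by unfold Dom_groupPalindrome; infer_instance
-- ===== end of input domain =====

-- B replaces the reversal-and-compare palindrome test with a two-pointer scan from both ends
-- (early exit on mismatch) and a comprehension-style filter; alternative decomposition, same cost.


-- ===== PORT A =====
-- for el in strs: if el == el[::-1]: pals.append(el)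
def groupPalindrome (strs : List String) : List String :=
  strs.foldl (fun pals el =>
    if some el = PySem.Str.slice? el none none (-1) then pals ++ [el] else pals) []

-- ===== PORT B =====
-- i, j = 0, len(el)-1; while i < j: if el[i] != el[j]: return False; i += 1; j -= 1; return True
def pvTwoPtr (cs : List Char) (i j : Nat) : Bool :=
  if i < j then
    if cs.getD i ' ' = cs.getD j ' ' then pvTwoPtr cs (i + 1) (j - 1) else false
  else true
termination_by j - i

def groupPalindrome_alt (strs : List String) : List String :=
  strs.filter (fun el => pvTwoPtr el.toList 0 (el.toList.length - 1))

-- ===== PRECONDITION & SPEC =====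
def Spec_groupPalindrome (strs : List String) (out : List String) : Prop := out = groupPalindrome_alt strs
instance (strs : List String) (out : List String) : Decidable (Spec_groupPalindrome strs out) := by unfold Spec_groupPalindrome; infer_instance

-- ===== CLAIM (what is proved, stated in full; the proofs are below) =====
def Claim_equal_groupPalindrome : Prop := ∀ (strs : List String), Dom_groupPalindrome strs → Spec_groupPalindrome strs (groupPalindrome strs)

-- ===== LEMMAS AND PROOFS =====

-- invariant of the two-pointer loop: it checks exactly the pairs (k, i+j-k) with i ≤ k, 2k < i+j
theorem pvTwoPtr_iff_aux (n : Nat) : ∀ (cs : List Char) (i j : Nat), j - i ≤ n →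
    (pvTwoPtr cs i j = true ↔
      ∀ k, i ≤ k → 2 * k < i + j → cs.getD k ' ' = cs.getD (i + j - k) ' ') := by
  induction n with
  | zero =>
    intro cs i j hn
    rw [pvTwoPtr, if_neg (by omega)]
    constructor
    · intro _ k hk h2
      exact absurd h2 (by omega)
    · intro _
      rfl
  | succ n ih =>
    intro cs i j hn
    rw [pvTwoPtr]
    by_cases hij : i < j
    · rw [if_pos hij]
      by_cases heq : cs.getD i ' ' = cs.getD j ' '
      · rw [if_pos heq, ih cs (i + 1) (j - 1) (by omega)]
        have hsum : i + 1 + (j - 1) = i + j := by omega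
        rw [hsum]
        constructor
        · intro h k hik h2
          rcases eq_or_lt_of_le hik with h' | h'
          · have hj : i + j - k = j := by omega
            rw [hj, ← h']
            exact heq
          · exact h k h' h2
        · intro h k hik h2
          exact h k (by omega) h2
      · rw [if_neg heq]
        constructor
        · intro hf
          exact absurd hf (by simp)
        intro h
        exfalso
        have := h i le_rfl (by omega)
        rw [show i + j - i = j from by omega] at this
        exact heq this
    · rw [if_neg hij]
      constructor
      · intro _ k hk h2
        exact absurd h2 (by omega)
      · intro _
        rfl

theorem pvTwoPtr_iff (cs : List Char) (i j : Nat) :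
    pvTwoPtr cs i j = true ↔
      ∀ k, i ≤ k → 2 * k < i + j → cs.getD k ' ' = cs.getD (i + j - k) ' ' :=
  pvTwoPtr_iff_aux (j - i) cs i j le_rfl

theorem pvTwoPtr_eq_pal (cs : List Char) :
    pvTwoPtr cs 0 (cs.length - 1) = true ↔ cs = cs.reverse := by
  rw [pvTwoPtr_iff]
  have key : ∀ a b : Nat, a < cs.length → b < cs.length →
      cs.getD a ' ' = cs.getD b ' ' → cs[a]? = cs[b]? := by
    intro a b ha hb hab
    simp only [List.getD_eq_getElem?_getD, List.getElem?_eq_getElem ha,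
      List.getElem?_eq_getElem hb, Option.getD_some] at hab
    simp [List.getElem?_eq_getElem ha, List.getElem?_eq_getElem hb, hab]
  constructor
  · intro h
    apply List.ext_getElem?
    intro k
    by_cases hk : k < cs.length
    · rw [List.getElem?_reverse hk]
      rcases Nat.lt_trichotomy (2 * k) (cs.length - 1) with h2 | h2 | h2
      · exact key k (cs.length - 1 - k) hk (by omega)
          (by have := h k (Nat.zero_le _) (by omega)
              have he : 0 + (cs.length - 1) - k = cs.length - 1 - k := by omega
              rwa [he] at this)
      · have : cs.length - 1 - k = k := by omega
        rw [this]
      · exact key k (cs.length - 1 - k) hk (by omega)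
          (by have := h (cs.length - 1 - k) (Nat.zero_le _) (by omega)
              have he : 0 + (cs.length - 1) - (cs.length - 1 - k) = k := by omega
              rw [he] at this
              exact this.symm)
    · rw [List.getElem?_eq_none (by omega), List.getElem?_eq_none (by simpa using (by omega : cs.length ≤ k))]
  · intro h k _ h2
    have hk1 : k < cs.length := by omega
    have he : 0 + (cs.length - 1) - k = cs.length - 1 - k := by omega
    have h1 : cs[k]? = cs[cs.length - 1 - k]? := by
      conv_lhs => rw [h]
      exact List.getElem?_reverse hk1
    rw [he]
    simp [List.getD_eq_getElem?_getD, h1]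

theorem test_eq (el : String) :
    (decide (some el = PySem.Str.slice? el none none (-1))) =
      pvTwoPtr el.toList 0 (el.toList.length - 1) := by
  rw [PySem.Str.slice?_none_none_neg_one]
  have hiff : el = String.ofList el.toList.reverse ↔ el.toList = el.toList.reverse := by
    constructor
    · intro he
      conv_lhs => rw [he]
      simp
    · intro he
      rw [← he, String.ofList_toList]
  by_cases h : el.toList = el.toList.reverse
  · rw [(pvTwoPtr_eq_pal el.toList).mpr h]
    simp only [decide_eq_true_eq, Option.some.injEq]
    exact hiff.mpr h
  · have hb : pvTwoPtr el.toList 0 (el.toList.length - 1) = false := by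
      cases hb : pvTwoPtr el.toList 0 (el.toList.length - 1)
      · rfl
      · exact absurd ((pvTwoPtr_eq_pal el.toList).mp hb) h
    rw [hb]
    simp only [decide_eq_false_iff_not, Option.some.injEq]
    exact fun he => h (hiff.mp he)

-- ===== VERDICT (by name: the statement is the Claim_ definition above) =====
theorem groupPalindrome_spec : Claim_equal_groupPalindrome := by
  intro strs _
  unfold Spec_groupPalindrome groupPalindrome groupPalindrome_alt
  rw [PySem.List.foldl_append_ite_eq_filter]
  rw [List.nil_append]
  apply List.filter_congr
  intro el _
  exact test_eq el
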